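-- pv_equiv track=rewrite | github.com/danielcgiraldo/python | live.py | existe
-- ===== SOURCE A (Python) =====
-- def subconjuntos(pesos):
--     if len(pesos) > 1:
--         for item in subconjuntos(pesos[1:]):
--             yield [pesos[0]]+item
--             yield item
--     else:
--         yield pesos
--         yield []
--
-- def existe(max, pesos):
--     result = []
--     subc = [i for i in subconjuntos(pesos) if len(i) != 0]
--
--     for subconjunto in subc:
--         if(sum(subconjunto) == max):
--             subconjunto.sort()
--             result.append(subconjunto)
--     result.sort(key=lambda x: x)
--
--     return sorted(result, key=len)
-- ===== SOURCE B (Python) =====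
-- def combinations(items, r):
--     if r == 0:
--         return [[]]
--     if len(items) == 0:
--         return []
--     rest = items[1:]
--     return [[items[0]] + tail for tail in combinations(rest, r - 1)] + combinations(rest, r)
--
-- def existe(max, pesos):
--     result = []
--     for r in range(1, len(pesos) + 1):
--         for combo in combinations(pesos, r):
--             if sum(combo) == max:
--                 result.append(sorted(combo))
--     result.sort(key=lambda x: x)
--     return sorted(result, key=len)
-- ===== Notes on version B (the rewrite author's own statement) =====
-- stated objective: idiomatic
-- what changed: Replaces A's recursive interleaving powerset generator (plus a post-hoc filter of the empty subset) with the idiomatic combinations-by-cardinality enumeration: for each size r = 1..len(pesos) enumerate all r-element combinations, keep those summing to max, then apply the same two stable sorts (lexicographic, then by length).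
import Mathlib
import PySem

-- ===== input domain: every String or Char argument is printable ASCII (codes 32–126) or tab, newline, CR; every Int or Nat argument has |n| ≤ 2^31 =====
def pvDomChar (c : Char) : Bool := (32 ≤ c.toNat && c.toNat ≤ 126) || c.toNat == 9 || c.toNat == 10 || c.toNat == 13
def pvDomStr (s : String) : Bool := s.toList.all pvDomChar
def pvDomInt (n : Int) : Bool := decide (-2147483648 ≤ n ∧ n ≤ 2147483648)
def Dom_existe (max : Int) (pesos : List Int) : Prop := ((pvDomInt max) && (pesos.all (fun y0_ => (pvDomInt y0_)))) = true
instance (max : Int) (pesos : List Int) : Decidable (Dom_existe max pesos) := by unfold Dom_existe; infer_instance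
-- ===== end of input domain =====

-- B replaces A's recursive powerset generator by a combinations-by-cardinality enumeration
-- (all r-element combinations for r = 1..len(pesos)); same cost class, a more idiomatic decomposition.

-- ===== PORT A =====
-- A's generator materialized: the two yields per item become the two-element list [pesos[0]::item, item].
-- pesos[0] is ported as headI: the branch guard guarantees pesos.length > 1, so the index is in range.
def subconjuntos (pesos : List Int) : List (List Int) :=
  if pesos.length > 1 then
    (subconjuntos (PySem.List.slice pesos (some 1) none)).flatMap
      (fun item => [pesos.headI :: item, item])
  else
    [pesos, []]
termination_by pesos.length
decreasing_by
  rw [PySem.List.slice_from_one]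
  simp only [List.length_tail]
  omega

def existe (max : Int) (pesos : List Int) : List (List Int) :=
  let subc := (subconjuntos pesos).filter (fun i => i.length != 0)
  let result := subc.foldl
    (fun acc subconjunto =>
      if subconjunto.sum == max then acc ++ [PySem.List.sorted subconjunto (fun x => x) false]
      else acc) []
  let result2 := PySem.List.sorted result (fun x => x) false
  PySem.List.sorted result2 (fun x => (x.length : Int)) false

-- ===== PORT B =====
-- Source B's hand-written combinations; items[0] ported as headI (the branch guard guarantees items ≠ []).
def combinationsB (items : List Int) (r : Int) : List (List Int) :=
  if r = 0 then [[]]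
  else if items.length = 0 then []
  else
    (combinationsB (PySem.List.slice items (some 1) none) (r - 1)).map
        (fun tail => items.headI :: tail)
      ++ combinationsB (PySem.List.slice items (some 1) none) r
termination_by items.length
decreasing_by
  all_goals
    rw [PySem.List.slice_from_one]
    simp only [List.length_tail]
    omega

def existe_alt (max : Int) (pesos : List Int) : List (List Int) :=
  let result := (PySem.List.pyRange 1 ((pesos.length : Int) + 1) 1).foldl
    (fun acc r =>
      (combinationsB pesos r).foldl
        (fun acc2 combo =>
          if combo.sum == max then acc2 ++ [PySem.List.sorted combo (fun x => x) false]
          else acc2) acc) []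
  let result2 := PySem.List.sorted result (fun x => x) false
  PySem.List.sorted result2 (fun x => (x.length : Int)) false

-- ===== PRECONDITION & SPEC =====
def Spec_existe (max : Int) (pesos : List Int) (out : List (List Int)) : Prop := out = existe_alt max pesos
instance (max : Int) (pesos : List Int) (out : List (List Int)) : Decidable (Spec_existe max pesos out) := by unfold Spec_existe; infer_instance

-- ===== CLAIM (what is proved, stated in full; the proofs are below) =====
def Claim_equal_existe : Prop := ∀ (max : Int) (pesos : List Int), Dom_existe max pesos → Spec_existe max pesos (existe max pesos)

-- ===== LEMMAS AND PROOFS =====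

-- All (k+1)-element combinations of l, for k = 0..l.length-1: the non-empty position-subsets of l.
def allNonempty (l : List Int) : List (List Int) :=
  (List.range l.length).flatMap (fun k => PySem.List.combinations l (k + 1))

theorem combinationsB_eq (items : List Int) (r : Nat) :
    combinationsB items (r : Int) = PySem.List.combinations items r := by
  induction items generalizing r with
  | nil =>
      cases r with
      | zero => simp [combinationsB, PySem.List.combinations_zero]
      | succ r =>
          simp [combinationsB, PySem.List.combinations_nil_succ]
          omega
  | cons a t ih =>
      cases r with
      | zero => simp [combinationsB, PySem.List.combinations_zero]
      | succ r =>
          rw [combinationsB]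
          have h1 : ¬((((r : Nat) + 1 : Nat) : Int) = 0) := by push_cast; omega
          have h2 : ((((r : Nat) + 1 : Nat) : Int) - 1) = ((r : Nat) : Int) := by push_cast; omega
          rw [if_neg h1]
          simp only [List.length_cons, PySem.List.slice_from_one, List.tail_cons,
            List.headI_cons, h2]
          rw [ih r, ih (r + 1), PySem.List.combinations_cons_succ]
          simp

-- the generator's two yields per element, as a multiset: the cons-image plus the list itself
theorem flatMap_pair_perm (a : Int) (L : List (List Int)) :
    (L.flatMap (fun item => [a :: item, item])).Perm (L.map (fun item => a :: item) ++ L) := by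
  induction L with
  | nil => simp
  | cons x L ih =>
      simp only [List.flatMap_cons, List.map_cons, List.cons_append]
      refine List.Perm.cons _ ?_
      exact (ih.cons x).trans List.perm_middle.symm

theorem flatMap_append_perm {α β : Type} (L : List α) (f g : α → List β) :
    (L.flatMap (fun x => f x ++ g x)).Perm (L.flatMap f ++ L.flatMap g) := by
  induction L with
  | nil => simp
  | cons x L ih =>
      simp only [List.flatMap_cons]
      refine (ih.append_left (f x ++ g x)).trans ?_
      simp only [List.append_assoc]
      refine List.Perm.append_left (f x) ?_
      have h3 : ((g x ++ L.flatMap f) ++ L.flatMap g).Perm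
          ((L.flatMap f ++ g x) ++ L.flatMap g) := (List.perm_append_comm).append_right _
      rw [List.append_assoc, List.append_assoc] at h3
      exact h3

theorem flatMap_over_map {α β γ : Type} (l : List α) (f : α → β) (g : β → List γ) :
    (l.map f).flatMap g = l.flatMap (fun x => g (f x)) := by
  induction l with
  | nil => rfl
  | cons x l ih => simp [List.flatMap_cons, ih]

theorem allNonempty_cons (a : Int) (t : List Int) :
    (allNonempty (a :: t)).Perm
      ([a] :: (List.map (fun item => a :: item) (allNonempty t) ++ allNonempty t)) := by
  have hsplit : allNonempty (a :: t)
      = (List.range (t.length + 1)).flatMap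
          (fun k => (PySem.List.combinations t k).map (fun c => a :: c)
            ++ PySem.List.combinations t (k + 1)) := by
    unfold allNonempty
    simp only [List.length_cons]
    refine List.flatMap_congr ?_
    intro k _
    rw [PySem.List.combinations_cons_succ]
  have h1 : (List.range (t.length + 1)).flatMap
      (fun k => (PySem.List.combinations t k).map (fun c => a :: c))
      = [a] :: List.map (fun item => a :: item) (allNonempty t) := by
    rw [List.range_succ_eq_map, List.flatMap_cons, flatMap_over_map]
    simp only [PySem.List.combinations_zero, List.map_cons, List.map_nil, Nat.succ_eq_add_one]
    unfold allNonempty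
    rw [← List.map_flatMap]
    rfl
  have hz : PySem.List.combinations t (t.length + 1) = [] :=
    PySem.List.combinations_eq_nil_of_length_lt t (by omega)
  have h2 : (List.range (t.length + 1)).flatMap (fun k => PySem.List.combinations t (k + 1))
      = allNonempty t := by
    rw [List.range_succ, List.flatMap_append]
    unfold allNonempty
    simp [hz]
  have hp := flatMap_append_perm (List.range (t.length + 1))
    (fun k => (PySem.List.combinations t k).map (fun c => a :: c))
    (fun k => PySem.List.combinations t (k + 1))
  rw [h1, h2] at hp
  rw [hsplit]
  simpa using hp

theorem subconjuntos_perm (l : List Int) (h : l ≠ []) :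
    (subconjuntos l).Perm ([] :: allNonempty l) := by
  induction l with
  | nil => exact absurd rfl h
  | cons a t ih =>
      cases t with
      | nil =>
          rw [subconjuntos]
          simp only [List.length_cons, List.length_nil]
          rw [if_neg (by omega)]
          have : allNonempty [a] = [[a]] := by
            unfold allNonempty
            simp [PySem.List.combinations_one]
          rw [this]
          exact List.Perm.swap _ _ _
      | cons b t' =>
          have ih' := ih (by simp)
          rw [subconjuntos]
          rw [if_pos (by simp)]
          simp only [PySem.List.slice_from_one, List.tail_cons, List.headI_cons]
          have s1 : ((subconjuntos (b :: t')).flatMap (fun item => [a :: item, item])).Perm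
              ((([] : List Int) :: allNonempty (b :: t')).flatMap
                (fun item => [a :: item, item])) :=
            ih'.flatMap (fun x _ => List.Perm.refl _)
          have s2 : ((([] : List Int) :: allNonempty (b :: t')).flatMap
              (fun item => [a :: item, item]))
              = [a] :: [] :: (allNonempty (b :: t')).flatMap (fun item => [a :: item, item]) := by
            simp [List.flatMap_cons]
          have s3 : ([a] :: ([] : List Int) ::
                (allNonempty (b :: t')).flatMap (fun item => [a :: item, item])).Perm
              (([] : List Int) :: [a] ::
                (allNonempty (b :: t')).flatMap (fun item => [a :: item, item])) :=
            List.Perm.swap _ _ _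
          have s4 : (([] : List Int) :: [a] ::
                (allNonempty (b :: t')).flatMap (fun item => [a :: item, item])).Perm
              (([] : List Int) :: [a] ::
                (List.map (fun item => a :: item) (allNonempty (b :: t'))
                  ++ allNonempty (b :: t'))) :=
            ((flatMap_pair_perm a _).cons _).cons _
          have s5 : (([] : List Int) :: [a] ::
                (List.map (fun item => a :: item) (allNonempty (b :: t'))
                  ++ allNonempty (b :: t'))).Perm
              (([] : List Int) :: allNonempty (a :: b :: t')) :=
            ((allNonempty_cons a (b :: t')).symm).cons _
          exact (((s1.trans (s2 ▸ List.Perm.rfl)).trans s3).trans s4).trans s5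

theorem mem_allNonempty_length_ne (l : List Int) (c : List Int) (hc : c ∈ allNonempty l) :
    (c.length != 0) = true := by
  unfold allNonempty at hc
  rw [List.mem_flatMap] at hc
  obtain ⟨k, _, hck⟩ := hc
  have := PySem.List.length_of_mem_combinations hck
  simp [this]

theorem filter_subconjuntos_perm (l : List Int) :
    ((subconjuntos l).filter (fun i => i.length != 0)).Perm (allNonempty l) := by
  cases l with
  | nil =>
      rw [subconjuntos]
      simp [allNonempty]
  | cons a t =>
      have h := (subconjuntos_perm (a :: t) (by simp)).filter (fun i => i.length != 0)
      have hfix : (([] : List Int) :: allNonempty (a :: t)).filter (fun i => i.length != 0)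
          = allNonempty (a :: t) := by
        rw [List.filter_cons]
        simp only [List.length_nil]
        rw [if_neg (by simp)]
        exact List.filter_eq_self.mpr (mem_allNonempty_length_ne (a :: t))
      rw [hfix] at h
      exact h

theorem enumB_eq (pesos : List Int) :
    (PySem.List.pyRange 1 ((pesos.length : Int) + 1) 1).flatMap (fun r => combinationsB pesos r)
      = allNonempty pesos := by
  rw [PySem.List.pyRange_one]
  have hn : (((pesos.length : Int) + 1) - 1).toNat = pesos.length := by omega
  rw [hn, flatMap_over_map]
  unfold allNonempty
  refine List.flatMap_congr ?_
  intro k _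
  have : (1 + (k : Int)) = (((k + 1 : Nat) : Int)) := by push_cast; ring
  rw [this, combinationsB_eq]

-- ===== VERDICT (by name: the statement is the Claim_ definition above) =====
theorem existe_spec : Claim_equal_existe := by
  intro max pesos _
  unfold Spec_existe existe existe_alt
  simp only []
  have hA : ((subconjuntos pesos).filter (fun i => i.length != 0)).foldl
      (fun acc subconjunto =>
        if subconjunto.sum == max then acc ++ [PySem.List.sorted subconjunto (fun x => x) false]
        else acc) []
      = ((((subconjuntos pesos).filter (fun i => i.length != 0)).filter
          (fun s => s.sum == max)).map (fun s => PySem.List.sorted s (fun x => x) false)) := by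
    rw [PySem.List.foldl_append_if]
    simp
  have hinner : ∀ (acc : List (List Int)) (r : Int),
      (combinationsB pesos r).foldl
        (fun acc2 combo =>
          if combo.sum == max then acc2 ++ [PySem.List.sorted combo (fun x => x) false]
          else acc2) acc
      = acc ++ ((combinationsB pesos r).filter (fun s => s.sum == max)).map
          (fun s => PySem.List.sorted s (fun x => x) false) := by
    intro acc r
    rw [PySem.List.foldl_append_if]
  have hB : (PySem.List.pyRange 1 ((pesos.length : Int) + 1) 1).foldl
      (fun acc r =>
        (combinationsB pesos r).foldl
          (fun acc2 combo =>
            if combo.sum == max then acc2 ++ [PySem.List.sorted combo (fun x => x) false]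
            else acc2) acc) []
      = ((allNonempty pesos).filter (fun s => s.sum == max)).map
          (fun s => PySem.List.sorted s (fun x => x) false) := by
    simp only [hinner]
    rw [PySem.List.foldl_append_eq_flatMap]
    rw [List.nil_append]
    rw [← List.map_flatMap, ← List.filter_flatMap, enumB_eq]
  rw [hA, hB]
  have hperm : ((((subconjuntos pesos).filter (fun i => i.length != 0)).filter
        (fun s => s.sum == max)).map (fun s => PySem.List.sorted s (fun x => x) false)).Perm
      (((allNonempty pesos).filter (fun s => s.sum == max)).map
        (fun s => PySem.List.sorted s (fun x => x) false)) :=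
    (((filter_subconjuntos_perm pesos).filter _).map _)
  have key : ∀ (X Y : List (List Int)), X.Perm Y →
      PySem.List.sorted X (fun x => x) false = PySem.List.sorted Y (fun x => x) false := by
    intro X Y hXY
    have h2 := (PySem.List.sorted_id_eq_sorted_id_iff_perm X Y).mpr hXY
    convert h2 using 2
  rw [key _ _ hperm]
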